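-- pv_equiv track=rewrite | github.com/cirosantilli/project-euler-solutions | solvers/419.py | vec_mul_pow
-- ===== SOURCE A (Python) =====
-- MOD_MASK = (1 << 30) - 1
--
-- def mat_mul(A: list[list[int]], B: list[list[int]]) -> list[list[int]]:
--     """Dense matrix multiply mod 2^30."""
--     m = len(A)
--     res = [[0] * m for _ in range(m)]
--     for i in range(m):
--         Ai = A[i]
--         Ri = res[i]
--         for k in range(m):
--             a = Ai[k]
--             if a:
--                 Bk = B[k]
--                 # accumulate row
--                 for j in range(m):
--                     Ri[j] = (Ri[j] + a * Bk[j]) & MOD_MASK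
--     return res
--
-- def vec_mul(v: list[int], M: list[list[int]]) -> list[int]:
--     """Row-vector times matrix mod 2^30."""
--     m = len(v)
--     out = [0] * m
--     for i, a in enumerate(v):
--         if a:
--             row = M[i]
--             for j in range(m):
--                 out[j] = (out[j] + a * row[j]) & MOD_MASK
--     return out
--
-- def vec_mul_pow(v: list[int], M: list[list[int]], exp: int) -> list[int]:
--     """Compute v * (M ** exp) mod 2^30."""
--     while exp > 0:
--         if exp & 1:
--             v = vec_mul(v, M)
--         exp >>= 1
--         if exp:
--             M = mat_mul(M, M)
--     return v
-- ===== SOURCE B (Python) =====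
-- MOD_MASK = (1 << 30) - 1
--
-- def mat_mul(A, B):
--     """Dense matrix multiply mod 2^30."""
--     m = len(A)
--     res = [[0] * m for _ in range(m)]
--     for i in range(m):
--         Ai = A[i]
--         Ri = res[i]
--         for k in range(m):
--             a = Ai[k]
--             if a:
--                 Bk = B[k]
--                 for j in range(m):
--                     Ri[j] = (Ri[j] + a * Bk[j]) & MOD_MASK
--     return res
--
-- def vec_mul(v, M):
--     """Row-vector times matrix mod 2^30."""
--     m = len(v)
--     out = [0] * m
--     for i, a in enumerate(v):
--         if a:
--             row = M[i]
--             for j in range(m):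
--                 out[j] = (out[j] + a * row[j]) & MOD_MASK
--     return out
--
-- def _power(M, e):
--     """M ** e mod 2^30 by recursive divide-and-conquer (e >= 1)."""
--     if e <= 1:
--         return M
--     h = _power(M, e // 2)
--     sq = mat_mul(h, h)
--     return mat_mul(sq, M) if e & 1 else sq
--
-- def vec_mul_pow(v, M, exp):
--     """Compute v * (M ** exp) mod 2^30."""
--     if exp <= 0:
--         return v
--     return vec_mul(v, _power(M, exp))
-- ===== Notes on version B (the rewrite author's own statement) =====
-- stated objective: alternative
-- what changed: B computes the whole matrix power M^exp once by a recursive divide-and-conquer helper (square the half-power, one extra multiply on odd exponents) and then performs a single vector-matrix multiply, instead of A's iterative squaring loop that folds the vector in at every set bit of exp.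
-- outside the precondition, e.g. on vec_mul_pow([1], [[1, 1], [1, 1]], 3): A returns [2], B returns [4]; on vec_mul_pow([0, 0], [[1], [2]], 1): A returns [0, 0], B returns [0, 0]
import Mathlib
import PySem

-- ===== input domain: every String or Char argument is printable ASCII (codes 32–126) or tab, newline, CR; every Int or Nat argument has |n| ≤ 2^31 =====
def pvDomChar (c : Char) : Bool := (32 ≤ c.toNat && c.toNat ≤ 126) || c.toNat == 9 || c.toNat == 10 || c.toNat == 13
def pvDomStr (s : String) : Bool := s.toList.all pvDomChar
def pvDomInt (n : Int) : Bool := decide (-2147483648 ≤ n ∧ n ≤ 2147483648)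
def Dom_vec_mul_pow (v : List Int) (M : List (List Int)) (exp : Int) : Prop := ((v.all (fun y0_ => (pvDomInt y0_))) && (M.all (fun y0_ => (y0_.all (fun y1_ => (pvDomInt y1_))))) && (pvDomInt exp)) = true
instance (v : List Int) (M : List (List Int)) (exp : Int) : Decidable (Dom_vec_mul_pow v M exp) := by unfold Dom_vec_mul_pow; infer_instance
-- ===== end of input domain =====

-- B computes the full matrix power M^exp once by recursive divide-and-conquer and then does a
-- single vector-matrix multiply, instead of A's iterative squaring loop that folds the vector
-- in at every set bit of exp (objective: alternative decomposition, same asymptotic cost).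

-- ===== PORT A =====
-- exact: Python's `x & MOD_MASK` with MOD_MASK = 2^30 - 1 equals `x % 2^30` for every int x
def pvMask (x : Int) : Int := PySem.Int.mod x 1073741824

-- mat_mul: rows of the result are computed independently; the j-loop writing every slot of
-- row i (which always has length m) is the map over `List.range m`.
def pvMatMul (A B : List (List Int)) : List (List Int) :=
  let m := A.length
  A.map (fun Ai =>
    (List.range m).foldl (fun Ri k =>
      let a := Ai.getD k 0
      if a ≠ 0 then
        let Bk := B.getD k []
        (List.range m).map (fun j => pvMask (Ri.getD j 0 + a * Bk.getD j 0))
      else Ri) (List.replicate m 0))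

-- vec_mul: `for i, a in enumerate(v)` is the fold over v.zipIdx (pairs (a, i), i : Nat ≥ 0)
def pvVecMul (v : List Int) (M : List (List Int)) : List Int :=
  let m := v.length
  v.zipIdx.foldl (fun out p =>
    if p.1 ≠ 0 then
      let row := M.getD p.2 []
      (List.range m).map (fun j => pvMask (out.getD j 0 + p.1 * row.getD j 0))
    else out) (List.replicate m 0)

-- the while-loop of vec_mul_pow; `exp & 1` is PySem.Int.band, `exp >>= 1` is `exp >>> 1`
def pvLoopA (v : List Int) (M : List (List Int)) (exp : Int) : List Int :=
  if _h : 0 < exp then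
    let v' := if PySem.Int.band exp 1 ≠ 0 then pvVecMul v M else v
    let e' := exp >>> (1 : Nat)
    let M' := if e' ≠ 0 then pvMatMul M M else M
    pvLoopA v' M' e'
  else v
termination_by exp.toNat
decreasing_by
  have h2 : exp >>> (1 : Nat) = exp / 2 ^ 1 := Int.shiftRight_eq_div_pow exp 1
  simp only [h2]
  omega

def vec_mul_pow (v : List Int) (M : List (List Int)) (exp : Int) : List Int :=
  pvLoopA v M exp

-- ===== PORT B =====
-- _power(M, e): recursive divide-and-conquer matrix power (called with e ≥ 1)
def pvPower (M : List (List Int)) (e : Int) : List (List Int) :=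
  if _h : e ≤ 1 then M
  else
    let hh := pvPower M (PySem.Int.floordiv e 2)
    let sq := pvMatMul hh hh
    if PySem.Int.band e 1 ≠ 0 then pvMatMul sq M else sq
termination_by e.toNat
decreasing_by
  have h2 : PySem.Int.floordiv e 2 = e / 2 := PySem.Int.floordiv_eq_ediv_of_pos (by omega)
  simp only [h2]
  omega

def vec_mul_pow_alt (v : List Int) (M : List (List Int)) (exp : Int) : List Int :=
  if exp ≤ 0 then v
  else pvVecMul v (pvPower M exp)

-- ===== PRECONDITION & SPEC =====
-- Pre_ excludes exp ≥ 1 inputs whose dimensions are inconsistent (len(M) ≠ len(v) or a row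
-- shorter than len(v)): there A either raises IndexError or returns an accidental value that
-- depends on which out-of-range entries its zero-skipping happens to touch.
def Pre_vec_mul_pow (v : List Int) (M : List (List Int)) (exp : Int) : Prop :=
  exp ≤ 0 ∨ (M.length = v.length ∧ ∀ row ∈ M, v.length ≤ row.length)
instance (v : List Int) (M : List (List Int)) (exp : Int) : Decidable (Pre_vec_mul_pow v M exp) := by unfold Pre_vec_mul_pow; infer_instance

def pvWitness_vec_mul_pow : List Int × List (List Int) × Int := ([1, 2], [[1, 2], [3, 4]], 3)

def Spec_vec_mul_pow (v : List Int) (M : List (List Int)) (exp : Int) (out : List Int) : Prop := out = vec_mul_pow_alt v M exp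
instance (v : List Int) (M : List (List Int)) (exp : Int) (out : List Int) : Decidable (Spec_vec_mul_pow v M exp out) := by unfold Spec_vec_mul_pow; infer_instance

-- ===== CLAIM (what is proved, stated in full; the proofs are below) =====
def Claim_equal_vec_mul_pow : Prop := ∀ (v : List Int) (M : List (List Int)) (exp : Int), Dom_vec_mul_pow v M exp → Pre_vec_mul_pow v M exp → Spec_vec_mul_pow v M exp (vec_mul_pow v M exp)

-- ===== LEMMAS AND PROOFS =====

-- Everything is interpreted in ZMod 2^30: both programs keep every entry reduced mod 2^30,
-- so both compute (images of) v ᵥ* M ^ exp there, and Mathlib's matrix ring does the algebra.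

def toVecZ (m : Nat) (v : List Int) : Fin m → ZMod 1073741824 :=
  fun i => ((v.getD i.val 0 : Int) : ZMod 1073741824)

def toMatZ (m : Nat) (M : List (List Int)) : Matrix (Fin m) (Fin m) (ZMod 1073741824) :=
  Matrix.of fun i j => (((M.getD i.val []).getD j.val 0 : Int) : ZMod 1073741824)

def ofVecZ (m : Nat) (f : Fin m → ZMod 1073741824) : List Int :=
  (List.finRange m).map (fun j => ((f j).val : Int))

def ofMatZ (m : Nat) (P : Matrix (Fin m) (Fin m) (ZMod 1073741824)) : List (List Int) :=
  (List.finRange m).map (fun i => ofVecZ m (fun j => P i j))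

lemma length_ofVecZ (m : Nat) (f : Fin m → ZMod 1073741824) : (ofVecZ m f).length = m := by
  simp [ofVecZ]

lemma length_ofMatZ (m : Nat) (P : Matrix (Fin m) (Fin m) (ZMod 1073741824)) :
    (ofMatZ m P).length = m := by simp [ofMatZ]

lemma getD_ofVecZ (m : Nat) (f : Fin m → ZMod 1073741824) (j : Nat) (h : j < m) :
    (ofVecZ m f).getD j 0 = ((f ⟨j, h⟩).val : Int) := by
  rw [List.getD_eq_getElem]
  · simp [ofVecZ]
  · simp [ofVecZ, h]

lemma getD_ofMatZ (m : Nat) (P : Matrix (Fin m) (Fin m) (ZMod 1073741824)) (i : Nat) (h : i < m) :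
    (ofMatZ m P).getD i [] = ofVecZ m (fun j => P ⟨i, h⟩ j) := by
  rw [List.getD_eq_getElem]
  · simp [ofMatZ]
  · simp [ofMatZ, h]

lemma mask_val (x : Int) : pvMask x = (((x : ZMod 1073741824)).val : Int) := by
  rw [pvMask, PySem.Int.mod_eq_emod_of_pos (by norm_num), ZMod.val_intCast]
  norm_num

lemma cast_val (a : ZMod 1073741824) : (((a.val : Int)) : ZMod 1073741824) = a := by
  push_cast
  simp [ZMod.natCast_val, ZMod.cast_id]

lemma toVec_ofVec (m : Nat) (f : Fin m → ZMod 1073741824) : toVecZ m (ofVecZ m f) = f := by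
  funext i
  rw [toVecZ, getD_ofVecZ m f i.val i.isLt, cast_val]

lemma toMat_ofMat (m : Nat) (P : Matrix (Fin m) (Fin m) (ZMod 1073741824)) :
    toMatZ m (ofMatZ m P) = P := by
  funext i j
  rw [toMatZ]
  simp only [Matrix.of_apply]
  rw [getD_ofMatZ m P i.val i.isLt, getD_ofVecZ m _ j.val j.isLt, cast_val]

lemma replicate_eq_ofVecZ (m : Nat) : List.replicate m (0 : Int) = ofVecZ m (fun _ => 0) := by
  simp [ofVecZ]

lemma sum_range_map (m : Nat) (g : Nat → ZMod 1073741824) :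
    ((List.range m).map g).sum = ∑ i : Fin m, g i.val := by
  rw [Fin.sum_univ_def, ← List.map_coe_finRange_eq_range, List.map_map]
  rfl

-- invariant of the inner accumulate loops of vec_mul / mat_mul
lemma pvFold_spec (M : List (List Int)) (m : Nat) :
    ∀ (s : List (Int × Nat)) (acc : Fin m → ZMod 1073741824),
      s.foldl (fun out p =>
          if p.1 ≠ 0 then
            (List.range m).map (fun j => pvMask (out.getD j 0 + p.1 * (M.getD p.2 []).getD j 0))
          else out) (ofVecZ m acc)
      = ofVecZ m (fun j => acc j +
          (s.map (fun p => ((p.1 : Int) : ZMod 1073741824) *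
            (((M.getD p.2 []).getD j.val 0 : Int) : ZMod 1073741824))).sum) := by
  intro s
  induction s with
  | nil => intro acc; simp
  | cons p s ih =>
    intro acc
    simp only [List.foldl_cons, List.map_cons, List.sum_cons]
    by_cases hp : p.1 = 0
    · simp only [hp, ne_eq, not_true_eq_false, if_false, Int.cast_zero, zero_mul, zero_add]
      exact ih acc
    · have hstep : (List.range m).map (fun j => pvMask ((ofVecZ m acc).getD j 0 + p.1 * (M.getD p.2 []).getD j 0))
          = ofVecZ m (fun j => acc j + ((p.1 : Int) : ZMod 1073741824) *
              (((M.getD p.2 []).getD j.val 0 : Int) : ZMod 1073741824)) := by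
        apply List.ext_getElem
        · simp [ofVecZ]
        · intro j h1 h2
          simp only [List.getElem_map, List.getElem_range]
          have hj : j < m := by simpa using h1
          rw [getD_ofVecZ m acc j hj, mask_val]
          simp only [ofVecZ, List.getElem_map, List.getElem_finRange]
          congr 1
          push_cast
          simp [ZMod.natCast_val, ZMod.cast_id]
      simp only [ne_eq, hp, not_false_eq_true, if_true, hstep, ih]
      congr 1
      funext j
      rw [add_assoc]

lemma pvVecMul_spec (m : Nat) (v : List Int) (M : List (List Int)) (hv : v.length = m) :
    pvVecMul v M = ofVecZ m (Matrix.vecMul (toVecZ m v) (toMatZ m M)) := by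
  subst hv
  unfold pvVecMul
  dsimp only
  rw [replicate_eq_ofVecZ, pvFold_spec]
  congr 1
  funext j
  rw [zero_add]
  have hmap : v.zipIdx.map (fun p => ((p.1 : Int) : ZMod 1073741824) *
      (((M.getD p.2 []).getD j.val 0 : Int) : ZMod 1073741824))
      = (List.finRange v.length).map (fun i => toVecZ v.length v i * toMatZ v.length M i j) := by
    apply List.ext_getElem
    · simp
    · intro k h1 h2
      simp [toVecZ, toMatZ, List.getElem_zipIdx]
  rw [hmap, ← Fin.sum_univ_def]
  simp [Matrix.vecMul, dotProduct]

lemma pvMatMul_spec (m : Nat) (A B : List (List Int)) (hA : A.length = m) :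
    pvMatMul A B = ofMatZ m (toMatZ m A * toMatZ m B) := by
  subst hA
  unfold pvMatMul
  dsimp only
  apply List.ext_getElem
  · simp [ofMatZ]
  · intro i h1 h2
    have hi : i < A.length := by simpa using h1
    simp only [List.getElem_map, ofMatZ, List.getElem_finRange]
    have hrow : (List.range A.length).foldl (fun Ri k =>
        let a := (A[i]).getD k 0
        if a ≠ 0 then
          let Bk := B.getD k []
          (List.range A.length).map (fun j => pvMask (Ri.getD j 0 + a * Bk.getD j 0))
        else Ri) (List.replicate A.length 0)
        = ((List.range A.length).map (fun k => ((A[i]).getD k 0, k))).foldl (fun out p =>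
            if p.1 ≠ 0 then
              (List.range A.length).map (fun j => pvMask (out.getD j 0 + p.1 * (B.getD p.2 []).getD j 0))
            else out) (List.replicate A.length 0) := by
      rw [List.foldl_map]
    rw [hrow, replicate_eq_ofVecZ, pvFold_spec]
    congr 1
    funext j
    rw [zero_add, List.map_map, sum_range_map]
    simp only [Matrix.mul_apply, toMatZ, Matrix.of_apply, Function.comp]
    congr 1
    funext k
    have hAi : A.getD i [] = A[i] := List.getD_eq_getElem A [] hi
    simp only [Fin.val_cast]
    rw [hAi]

lemma band_one_mod (e : Int) : PySem.Int.band e 1 = e % 2 := by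
  rw [PySem.Int.band_one, PySem.Int.mod_eq_emod_of_pos (by norm_num)]

lemma pvLoopA_spec : ∀ (n : Nat) (e : Int), e.toNat ≤ n → ∀ (v : List Int) (M : List (List Int)) (m : Nat),
    v.length = m → M.length = m →
    pvLoopA v M e = if 0 < e then
        ofVecZ m (Matrix.vecMul (toVecZ m v) ((toMatZ m M) ^ e.toNat))
      else v := by
  intro n
  induction n with
  | zero =>
    intro e hn v M m hv hM
    rw [pvLoopA]
    have : ¬ 0 < e := by omega
    simp [this]
  | succ n ih =>
    intro e hn v M m hv hM
    rw [pvLoopA]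
    by_cases he : 0 < e
    · simp only [dif_pos he]
      rw [if_pos he]
      have hshift : e >>> (1 : Nat) = e / 2 := by
        simpa using Int.shiftRight_eq_div_pow e 1
      by_cases h1 : e = 1
      · subst h1
        simp only [hshift]
        norm_num
        rw [pvLoopA]
        norm_num
        rw [pvVecMul_spec m v M hv]
      · have he' : 0 < e / 2 := by omega
        have hne : e / 2 ≠ 0 := by omega
        have hk : (e / 2).toNat ≤ n := by omega
        simp only [hshift, hne, if_true, ne_eq, not_false_eq_true]
        set v' := if PySem.Int.band e 1 ≠ 0 then pvVecMul v M else v with hv'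
        have hv'len : v'.length = m := by
          rw [hv']
          split
          · rw [pvVecMul_spec m v M hv]; exact length_ofVecZ m _
          · exact hv
        have hMlen : (pvMatMul M M).length = m := by
          rw [pvMatMul_spec m M M hM]; exact length_ofMatZ m _
        rw [ih (e / 2) hk v' (pvMatMul M M) m hv'len hMlen]
        rw [if_pos he']
        rw [pvMatMul_spec m M M hM, toMat_ofMat]
        have hsq : toMatZ m M * toMatZ m M = (toMatZ m M) ^ 2 := (sq (toMatZ m M)).symm
        by_cases hodd : PySem.Int.band e 1 ≠ 0
        · have hnat : e.toNat = 2 * (e / 2).toNat + 1 := by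
            have hm1 : e % 2 = 1 := by
              have := band_one_mod e
              rw [this] at hodd
              omega
            omega
          rw [hv', if_pos hodd]
          rw [pvVecMul_spec m v M hv, toVec_ofVec]
          rw [Matrix.vecMul_vecMul, hsq, ← pow_mul, ← pow_succ', hnat]
        · have hnat : e.toNat = 2 * (e / 2).toNat := by
            have hm0 : e % 2 = 0 := by
              have := band_one_mod e
              rw [this] at hodd
              omega
            omega
          rw [hv', if_neg hodd]
          rw [hsq, ← pow_mul, hnat]
    · simp [he]

lemma pvPower_spec : ∀ (n : Nat) (e : Int), e.toNat ≤ n → 1 ≤ e →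
    ∀ (M : List (List Int)) (m : Nat), M.length = m →
    (pvPower M e).length = m ∧ toMatZ m (pvPower M e) = (toMatZ m M) ^ e.toNat := by
  intro n
  induction n with
  | zero => intro e hn h1; omega
  | succ n ih =>
    intro e hn h1 M m hM
    rw [pvPower]
    by_cases he : e ≤ 1
    · have : e = 1 := by omega
      subst this
      simp only [dif_pos he, pow_one, Int.toNat_one]
      exact ⟨hM, trivial⟩
    · simp only [dif_neg he]
      have hfd : PySem.Int.floordiv e 2 = e / 2 := PySem.Int.floordiv_eq_ediv_of_pos (by omega)
      have hk : (e / 2).toNat ≤ n := by omega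
      have hk1 : 1 ≤ e / 2 := by omega
      obtain ⟨hlen, hmat⟩ := ih (e / 2) hk hk1 M m hM
      rw [hfd]
      have hsq := pvMatMul_spec m (pvPower M (e / 2)) (pvPower M (e / 2)) hlen
      have hsqlen : (pvMatMul (pvPower M (e / 2)) (pvPower M (e / 2))).length = m := by
        rw [hsq]; exact length_ofMatZ m _
      have hsqmat : toMatZ m (pvMatMul (pvPower M (e / 2)) (pvPower M (e / 2)))
          = (toMatZ m M) ^ (2 * (e / 2).toNat) := by
        rw [hsq, toMat_ofMat, hmat, ← pow_add]
        congr 1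
        omega
      by_cases hodd : PySem.Int.band e 1 ≠ 0
      · rw [if_pos hodd]
        have hm1 : e % 2 = 1 := by rw [band_one_mod] at hodd; omega
        have hnat : e.toNat = 2 * (e / 2).toNat + 1 := by omega
        have h2 := pvMatMul_spec m (pvMatMul (pvPower M (e / 2)) (pvPower M (e / 2))) M hsqlen
        constructor
        · rw [h2]; exact length_ofMatZ m _
        · rw [h2, toMat_ofMat, hsqmat, hnat, pow_succ]
      · rw [if_neg hodd]
        have hm0 : e % 2 = 0 := by rw [band_one_mod] at hodd; omega
        have hnat : e.toNat = 2 * (e / 2).toNat := by omega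
        exact ⟨hsqlen, by rw [hsqmat, hnat]⟩

-- ===== VERDICT (by name: the statement is the Claim_ definition above) =====
theorem vec_mul_pow_spec : Claim_equal_vec_mul_pow := by
  intro v M e _ hpre
  unfold Spec_vec_mul_pow vec_mul_pow vec_mul_pow_alt
  by_cases he : e ≤ 0
  · rw [pvLoopA]
    simp [he, show ¬ (0 < e) by omega]
  · have hpos : 0 < e := by omega
    rcases hpre with h | ⟨hMv, _⟩
    · omega
    · have hA := pvLoopA_spec e.toNat e le_rfl v M v.length rfl hMv
      have hP := pvPower_spec e.toNat e le_rfl (by omega) M v.length hMv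
      have hB := pvVecMul_spec v.length v (pvPower M e) rfl
      rw [hA, hB, hP.2]
      simp [hpos, he]
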